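-- pv_equiv track=rewrite | github.com/Pranav9605/RihlaAi_Travel_Planner | backend/main.py | dynamic_format_itinerary
-- ===== SOURCE A (Python) =====
-- from typing import List, Dict, Any
--
-- def dynamic_format_itinerary(plan_text: str, augmented_items: List[Dict[str, str]]) -> str:
--     """
--     Dynamically format the itinerary text into Markdown.
--     Splits text into lines and appends an image snippet with hyperlink for any keyword found,
--     ensuring each keyword is rendered only once.
--     """
--     lines = plan_text.splitlines()
--     formatted_lines = []
--     rendered_keywords = set()
--
--     for line in lines:
--         stripped_line = line.strip()
--         if not stripped_line:
--             continue
--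
--         formatted_lines.append(stripped_line)
--         for item in augmented_items:
--             keyword = item["keyword"].lower()
--             if keyword in stripped_line.lower() and keyword not in rendered_keywords:
--                 snippet = (
--                     f"\n![{item['keyword']}]({item['image_url']})\n"
--                     f"[More Info]({item['more_info_link']})"
--                 )
--                 formatted_lines.append(snippet)
--                 rendered_keywords.add(keyword)
--
--     return "\n\n".join(formatted_lines)
-- ===== SOURCE B (Python) =====
-- def _first_line(k, lowers):
--     for i, ll in enumerate(lowers):
--         if k in ll:
--             return i
--     return None
--
--
-- def dynamic_format_itinerary(plan_text, augmented_items):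
--     lines = [s for s in (raw.strip() for raw in plan_text.splitlines()) if s]
--     if not lines:
--         return ""
--     lowers = [s.lower() for s in lines]
--     # index: first item per lowercased keyword, in item-list order
--     seen = set()
--     index = []
--     for item in augmented_items:
--         k = item["keyword"].lower()
--         if k not in seen:
--             seen.add(k)
--             index.append((k, item))
--     # assign each chosen item's snippet to the earliest line containing its keyword
--     assign = []
--     for k, item in index:
--         i = _first_line(k, lowers)
--         if i is not None:
--             snippet = (
--                 "\n![{}]({})\n[More Info]({})".format(
--                     item["keyword"], item["image_url"], item["more_info_link"]
--                 )
--             )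
--             assign.append((i, snippet))
--     out = []
--     for i, line in enumerate(lines):
--         out.append(line)
--         for j, s in assign:
--             if j == i:
--                 out.append(s)
--     return "\n\n".join(out)
-- ===== Notes on version B (the rewrite author's own statement) =====
-- stated objective: alternative
-- what changed: Instead of scanning the full item list at every line while maintaining a running rendered-keyword set, B first builds a first-wins index of items per lowercased keyword, assigns each indexed item's snippet to the earliest matching line, and then emits lines with their grouped snippets in one pass.
import Mathlib
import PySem

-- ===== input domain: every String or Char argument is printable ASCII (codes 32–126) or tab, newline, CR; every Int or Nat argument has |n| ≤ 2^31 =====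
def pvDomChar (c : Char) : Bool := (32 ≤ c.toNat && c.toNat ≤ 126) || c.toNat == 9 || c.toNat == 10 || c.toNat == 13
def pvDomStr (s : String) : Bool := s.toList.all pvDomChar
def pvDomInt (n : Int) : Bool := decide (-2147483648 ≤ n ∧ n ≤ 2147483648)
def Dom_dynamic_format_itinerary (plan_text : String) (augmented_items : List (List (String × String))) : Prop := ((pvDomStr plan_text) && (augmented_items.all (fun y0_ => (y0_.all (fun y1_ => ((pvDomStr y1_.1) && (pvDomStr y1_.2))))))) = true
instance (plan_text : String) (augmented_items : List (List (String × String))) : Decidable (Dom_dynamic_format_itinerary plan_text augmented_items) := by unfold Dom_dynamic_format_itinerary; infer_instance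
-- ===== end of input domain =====

-- B replaces A's per-line scan with a running rendered-set by a first-wins keyword index,
-- earliest-line assignment and a single grouped output pass (alternative decomposition, same cost class).

-- ===== PORT A =====
-- shared snippet/lookup helpers: both Pythons build the identical f-string from the same dict lookups
def pvLookup (item : List (String × String)) (k : String) : String :=
  ((PySem.Dict.mk item).get? k).getD ""   -- a missing key is a KeyError in Python: excluded by Pre_

def pvSnippet (item : List (String × String)) : String :=
  "\n![" ++ pvLookup item "keyword" ++ "](" ++ pvLookup item "image_url" ++
  ")\n[More Info](" ++ pvLookup item "more_info_link" ++ ")"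

-- the body of A's inner 'for item in augmented_items' loop
def pvStepItem (low : String) (st : List String × PySem.Set String) (item : List (String × String)) :
    List String × PySem.Set String :=
  let kw := pvLookup item "keyword"
  let k := PySem.Str.lower kw
  if PySem.Str.isIn k low && !(PySem.Set.contains st.2 k) then
    (st.1 ++ [pvSnippet item], PySem.Set.add st.2 k)
  else st

-- the body of A's outer 'for line in lines' loop
def pvStepLine (augmented_items : List (List (String × String)))
    (st : List String × PySem.Set String) (line : String) : List String × PySem.Set String :=
  let stripped := PySem.Str.strip line
  if stripped = "" then st
  else augmented_items.foldl (pvStepItem (PySem.Str.lower stripped)) (st.1 ++ [stripped], st.2)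

def dynamic_format_itinerary (plan_text : String) (augmented_items : List (List (String × String))) : String :=
  let lines := PySem.Str.splitlines plan_text
  let res := lines.foldl (pvStepLine augmented_items) ([], PySem.Set.empty)
  PySem.Str.join "\n\n" res.1

-- ===== PORT B =====
-- B's helper _first_line: index of the first line containing k, scanning with a counter
def pvFirstLine (k : String) (i : Int) : List String → Option Int
  | [] => none
  | l :: ls => if PySem.Str.isIn k l then some i else pvFirstLine k (i + 1) ls

def dynamic_format_itinerary_alt (plan_text : String) (augmented_items : List (List (String × String))) : String :=
  let lines := ((PySem.Str.splitlines plan_text).map PySem.Str.strip).filter (fun s => s != "")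
  if lines = [] then ""
  else
    let lowers := lines.map PySem.Str.lower
    -- first-wins index: (lowercased keyword, item), dedup via a seen-set
    let idx := augmented_items.foldl
      (fun (st : PySem.Set String × List (String × List (String × String))) item =>
        let k := PySem.Str.lower (pvLookup item "keyword")
        if PySem.Set.contains st.1 k then st
        else (PySem.Set.add st.1 k, st.2 ++ [(k, item)]))
      (PySem.Set.empty, [])
    -- assign each chosen item's snippet to its earliest matching line
    let assign := idx.2.foldl
      (fun (acc : List (Int × String)) p =>
        match pvFirstLine p.1 0 lowers with
        | some i => acc ++ [(i, pvSnippet p.2)]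
        | none => acc) []
    -- emit each line followed by its grouped snippets
    let out := (PySem.List.enumerate lines 0).foldl
      (fun (acc : List String) p =>
        (acc ++ [p.2]) ++ (assign.filter (fun q => q.1 == p.1)).map (fun q => q.2)) []
    PySem.Str.join "\n\n" out

-- ===== PRECONDITION & SPEC =====
-- Pre_ excludes inputs where A raises KeyError (a non-blank text with an item missing "keyword", or a
-- rendered item missing "image_url"/"more_info_link"); it is slightly conservative in also requiring the
-- image keys on a duplicate-keyword item whose keyword matches a line but which never renders (first item wins).
def Pre_dynamic_format_itinerary (plan_text : String) (augmented_items : List (List (String × String))) : Prop :=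
  let lines := ((PySem.Str.splitlines plan_text).map PySem.Str.strip).filter (fun s => s != "")
  lines = [] ∨ ∀ item ∈ augmented_items,
    (PySem.Dict.mk item).contains "keyword" = true ∧
    ((∃ l ∈ lines, PySem.Str.isIn (PySem.Str.lower (((PySem.Dict.mk item).get? "keyword").getD "")) (PySem.Str.lower l) = true) →
      (PySem.Dict.mk item).contains "image_url" = true ∧ (PySem.Dict.mk item).contains "more_info_link" = true)

instance (plan_text : String) (augmented_items : List (List (String × String))) : Decidable (Pre_dynamic_format_itinerary plan_text augmented_items) := by unfold Pre_dynamic_format_itinerary; infer_instance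

def pvWitness_dynamic_format_itinerary : String × (List (List (String × String))) :=
  ("Day 1: Visit Paris\n\n relax", [[("keyword", "Paris"), ("image_url", "u1"), ("more_info_link", "m1")], [("keyword", "zoo")]])

def Spec_dynamic_format_itinerary (plan_text : String) (augmented_items : List (List (String × String))) (out : String) : Prop := out = dynamic_format_itinerary_alt plan_text augmented_items
instance (plan_text : String) (augmented_items : List (List (String × String))) (out : String) : Decidable (Spec_dynamic_format_itinerary plan_text augmented_items out) := by unfold Spec_dynamic_format_itinerary; infer_instance

-- ===== CLAIM (what is proved, stated in full; the proofs are below) =====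
def Claim_equal_dynamic_format_itinerary : Prop := ∀ (plan_text : String) (augmented_items : List (List (String × String))), Dom_dynamic_format_itinerary plan_text augmented_items → Pre_dynamic_format_itinerary plan_text augmented_items → Spec_dynamic_format_itinerary plan_text augmented_items (dynamic_format_itinerary plan_text augmented_items)

-- ===== LEMMAS AND PROOFS =====

-- lowercased keyword of an item
def pvKey (item : List (String × String)) : String := PySem.Str.lower (pvLookup item "keyword")

-- first-wins dedup of items by lowercased keyword, given already-seen keys
def pvDedup (seen : List String) : List (List (String × String)) → List (String × List (String × String))
  | [] => []
  | it :: rest =>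
      let k := pvKey it
      if k ∈ seen then pvDedup seen rest else (k, it) :: pvDedup (k :: seen) rest

-- the per-line snippet selector
def pvFm (low : String) (p : String × List (String × String)) : Option String :=
  if PySem.Str.isIn p.1 low = true then some (pvSnippet p.2) else none

-- common reference semantics: line, its snippets, then the rest with matched keywords removed
def pvG : List (List (String × String)) → List String → List String
  | _, [] => []
  | items, l :: rest =>
      let low := PySem.Str.lower l
      l :: ((pvDedup [] items).filterMap (pvFm low) ++
        pvG (items.filter (fun it => !(PySem.Str.isIn (pvKey it) low))) rest)

-- dedup congruence: only membership of seen matters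
theorem pvDedup_congr (s₁ s₂ : List String) (items : List (List (String × String)))
    (h : ∀ it ∈ items, (pvKey it ∈ s₁ ↔ pvKey it ∈ s₂)) : pvDedup s₁ items = pvDedup s₂ items := by
  induction items generalizing s₁ s₂ with
  | nil => rfl
  | cons it rest ih =>
    have hk := h it (List.mem_cons_self ..)
    simp only [pvDedup]
    by_cases hm : pvKey it ∈ s₁
    · rw [if_pos hm, if_pos (hk.mp hm)]
      exact ih _ _ (fun x hx => h x (List.mem_cons_of_mem _ hx))
    · rw [if_neg hm, if_neg (fun hh => hm (hk.mpr hh))]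
      congr 1
      refine ih _ _ (fun x hx => ?_)
      have := h x (List.mem_cons_of_mem _ hx)
      simp only [List.mem_cons]
      tauto

-- dedup with seen u = dedup of the s-filtered items with seen t, when u ≈ t ∪ s
theorem pvDedup_filter_seen (items : List (List (String × String))) (u t s : List String)
    (h : ∀ x, x ∈ u ↔ x ∈ t ∨ x ∈ s) :
    pvDedup u items = pvDedup t (items.filter (fun it => !decide (pvKey it ∈ s))) := by
  induction items generalizing u t with
  | nil => rfl
  | cons it rest ih =>
    simp only [pvDedup, List.filter_cons]
    by_cases hs : pvKey it ∈ s
    · rw [if_pos ((h _).mpr (Or.inr hs))]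
      simp only [hs, decide_true, Bool.not_true, Bool.false_eq_true, if_false]
      exact ih u t h
    · simp only [hs, decide_false, Bool.not_false, if_true]
      by_cases ht : pvKey it ∈ t
      · rw [if_pos ((h _).mpr (Or.inl ht))]
        simp only [pvDedup, if_pos ht]
        exact ih u t h
      · rw [if_neg (fun hu => by rcases (h _).mp hu with h1 | h1 <;> [exact ht h1; exact hs h1])]
        simp only [pvDedup, if_neg ht]
        congr 1
        refine ih _ _ (fun x => ?_)
        have := h x
        simp only [List.mem_cons]
        tauto

-- dedup commutes with filtering by a predicate on the key
theorem pvDedup_filter_key (p : String → Bool) (items : List (List (String × String))) (s : List String) :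
    pvDedup s (items.filter (fun it => p (pvKey it))) = (pvDedup s items).filter (fun q => p q.1) := by
  induction items generalizing s with
  | nil => rfl
  | cons it rest ih =>
    simp only [pvDedup, List.filter_cons]
    by_cases hp : p (pvKey it) = true
    · simp only [hp, if_true]
      by_cases hs : pvKey it ∈ s
      · simp only [pvDedup, if_pos hs]
        exact ih s
      · simp only [pvDedup, if_neg hs, List.filter_cons, hp, if_true]
        rw [ih (pvKey it :: s)]
    · simp only [hp, Bool.false_eq_true, if_false]
      by_cases hs : pvKey it ∈ s
      · rw [if_pos hs]; exact ih s
      · rw [if_neg hs]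
        simp only [List.filter_cons, hp, Bool.false_eq_true, if_false]
        rw [← ih (pvKey it :: s)]
        refine pvDedup_congr _ _ _ (fun x hx => ?_)
        simp only [List.mem_filter] at hx
        have hne : pvKey x ≠ pvKey it := fun he => hp (he ▸ hx.2)
        simp [List.mem_cons, hne]

-- pvFirstLine only returns indices ≥ its counter
theorem pvFirstLine_ge (k : String) (ls : List String) (n j : Int) (h : pvFirstLine k n ls = some j) : n ≤ j := by
  induction ls generalizing n with
  | nil => simp [pvFirstLine] at h
  | cons l rest ih =>
    simp only [pvFirstLine] at h
    split at h
    · cases h; omega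
    · have := ih (n + 1) h
      omega

-- A's inner loop, characterised
theorem pvInner (low : String) (items : List (List (String × String))) (acc : List String)
    (R : PySem.Set String) (seen : List String)
    (h1 : ∀ x, PySem.Set.contains R x = true → x ∈ seen)
    (h2 : ∀ x ∈ seen, PySem.Set.contains R x = true ∨ PySem.Str.isIn x low = false) :
    (items.foldl (pvStepItem low) (acc, R)).1 = acc ++ (pvDedup seen items).filterMap (pvFm low) ∧
    (∀ k, PySem.Set.contains (items.foldl (pvStepItem low) (acc, R)).2 k = true ↔
      (PySem.Set.contains R k = true ∨ ∃ it ∈ items, pvKey it = k ∧ PySem.Str.isIn k low = true)) := by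
  induction items generalizing acc R seen with
  | nil => exact ⟨by simp [pvDedup], fun k => by simp⟩
  | cons it rest ih =>
    simp only [List.foldl_cons]
    have hstep : pvStepItem low (acc, R) it =
        if PySem.Str.isIn (pvKey it) low && !(PySem.Set.contains R (pvKey it)) then
          (acc ++ [pvSnippet it], PySem.Set.add R (pvKey it)) else (acc, R) := rfl
    cases hR : PySem.Set.contains R (pvKey it) with
    | true =>
      have hseen : pvKey it ∈ seen := h1 _ hR
      have hst : pvStepItem low (acc, R) it = (acc, R) := by rw [hstep, if_neg (fun hc => by rw [Bool.and_eq_true, hR] at hc; simp at hc)]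
      rw [hst]
      obtain ⟨ihl, ihr⟩ := ih acc R seen h1 h2
      refine ⟨by rw [ihl]; simp only [pvDedup, if_pos hseen], fun k => ?_⟩
      rw [ihr k]
      constructor
      · rintro (h | ⟨it', hm, he, hi⟩)
        · exact Or.inl h
        · exact Or.inr ⟨it', List.mem_cons_of_mem _ hm, he, hi⟩
      · rintro (h | ⟨it', hm, he, hi⟩)
        · exact Or.inl h
        · rcases List.mem_cons.mp hm with rfl | hm'
          · exact Or.inl (he ▸ hR)
          · exact Or.inr ⟨it', hm', he, hi⟩
    | false =>
      cases hin : PySem.Str.isIn (pvKey it) low with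
      | true =>
        have hns : pvKey it ∉ seen := fun hs => by rcases h2 _ hs with h' | h' <;> simp_all
        have hst : pvStepItem low (acc, R) it = (acc ++ [pvSnippet it], PySem.Set.add R (pvKey it)) := by
          rw [hstep, if_pos (by rw [Bool.and_eq_true, hR, hin]; exact ⟨rfl, rfl⟩)]
        rw [hst]
        have h1' : ∀ x, PySem.Set.contains (PySem.Set.add R (pvKey it)) x = true → x ∈ pvKey it :: seen := by
          intro x hx
          have hx' := (PySem.Set.contains_iff _ _).mp hx
          rw [PySem.Set.mem_add] at hx'
          rcases hx' with h' | h'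
          · exact List.mem_cons_of_mem _ (h1 _ ((PySem.Set.contains_iff _ _).mpr h'))
          · simp [h']
        have h2' : ∀ x ∈ pvKey it :: seen,
            PySem.Set.contains (PySem.Set.add R (pvKey it)) x = true ∨ PySem.Str.isIn x low = false := by
          intro x hx
          rcases List.mem_cons.mp hx with rfl | hx'
          · exact Or.inl ((PySem.Set.contains_iff _ _).mpr ((PySem.Set.mem_add _ _ _).mpr (Or.inr rfl)))
          · rcases h2 _ hx' with h' | h'
            · exact Or.inl ((PySem.Set.contains_iff _ _).mpr
                ((PySem.Set.mem_add _ _ _).mpr (Or.inl ((PySem.Set.contains_iff _ _).mp h'))))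
            · exact Or.inr h'
        obtain ⟨ihl, ihr⟩ := ih (acc ++ [pvSnippet it]) (PySem.Set.add R (pvKey it)) (pvKey it :: seen) h1' h2'
        refine ⟨?_, fun k => ?_⟩
        · rw [ihl]
          have hd : pvDedup seen (it :: rest) = (pvKey it, it) :: pvDedup (pvKey it :: seen) rest := by
            simp only [pvDedup, if_neg hns]
          rw [hd, List.filterMap_cons]
          have hfm : pvFm low (pvKey it, it) = some (pvSnippet it) := by
            simp only [pvFm]; rw [if_pos hin]
          rw [hfm]
          simp
        · rw [ihr k]
          constructor
          · rintro (h | ⟨it', hm, he, hi⟩)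
            · have hx' := (PySem.Set.contains_iff _ _).mp h
              rw [PySem.Set.mem_add] at hx'
              rcases hx' with h' | h'
              · exact Or.inl ((PySem.Set.contains_iff _ _).mpr h')
              · exact Or.inr ⟨it, List.mem_cons_self .., h'.symm, by rw [h']; exact hin⟩
            · exact Or.inr ⟨it', List.mem_cons_of_mem _ hm, he, hi⟩
          · rintro (h | ⟨it', hm, he, hi⟩)
            · exact Or.inl ((PySem.Set.contains_iff _ _).mpr
                ((PySem.Set.mem_add _ _ _).mpr (Or.inl ((PySem.Set.contains_iff _ _).mp h))))
            · rcases List.mem_cons.mp hm with rfl | hm'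
              · exact Or.inl ((PySem.Set.contains_iff _ _).mpr ((PySem.Set.mem_add _ _ _).mpr (Or.inr he.symm)))
              · exact Or.inr ⟨it', hm', he, hi⟩
      | false =>
        have hst : pvStepItem low (acc, R) it = (acc, R) := by rw [hstep, if_neg (fun hc => by rw [Bool.and_eq_true, hin] at hc; simp at hc)]
        rw [hst]
        by_cases hs : pvKey it ∈ seen
        · obtain ⟨ihl, ihr⟩ := ih acc R seen h1 h2
          refine ⟨by rw [ihl]; simp only [pvDedup, if_pos hs], fun k => ?_⟩
          rw [ihr k]
          constructor
          · rintro (h | ⟨it', hm, he, hi⟩)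
            · exact Or.inl h
            · exact Or.inr ⟨it', List.mem_cons_of_mem _ hm, he, hi⟩
          · rintro (h | ⟨it', hm, he, hi⟩)
            · exact Or.inl h
            · rcases List.mem_cons.mp hm with rfl | hm'
              · rw [← he] at hi; rw [hin] at hi; cases hi
              · exact Or.inr ⟨it', hm', he, hi⟩
        · have h1' : ∀ x, PySem.Set.contains R x = true → x ∈ pvKey it :: seen :=
            fun x hx => List.mem_cons_of_mem _ (h1 x hx)
          have h2' : ∀ x ∈ pvKey it :: seen,
              PySem.Set.contains R x = true ∨ PySem.Str.isIn x low = false := by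
            intro x hx
            rcases List.mem_cons.mp hx with rfl | hx'
            · exact Or.inr hin
            · exact h2 _ hx'
          obtain ⟨ihl, ihr⟩ := ih acc R (pvKey it :: seen) h1' h2'
          refine ⟨?_, fun k => ?_⟩
          · rw [ihl]
            have hd : pvDedup seen (it :: rest) = (pvKey it, it) :: pvDedup (pvKey it :: seen) rest := by
              simp only [pvDedup, if_neg hs]
            rw [hd, List.filterMap_cons]
            have hfm : pvFm low (pvKey it, it) = none := by
              simp only [pvFm]; rw [if_neg (by rw [hin]; simp)]
            rw [hfm]
          · rw [ihr k]
            constructor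
            · rintro (h | ⟨it', hm, he, hi⟩)
              · exact Or.inl h
              · exact Or.inr ⟨it', List.mem_cons_of_mem _ hm, he, hi⟩
            · rintro (h | ⟨it', hm, he, hi⟩)
              · exact Or.inl h
              · rcases List.mem_cons.mp hm with rfl | hm'
                · rw [← he] at hi; rw [hin] at hi; cases hi
                · exact Or.inr ⟨it', hm', he, hi⟩

-- A's outer loop over the processed (stripped, non-empty) lines computes pvG
theorem pvOuter (items : List (List (String × String))) (ls : List String) (acc : List String)
    (R : PySem.Set String) :
    (ls.foldl (fun st l => items.foldl (pvStepItem (PySem.Str.lower l)) (st.1 ++ [l], st.2)) (acc, R)).1 =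
      acc ++ pvG (items.filter (fun it => !(PySem.Set.contains R (pvKey it)))) ls := by
  induction ls generalizing acc R with
  | nil => simp [pvG]
  | cons l rest ih =>
    simp only [List.foldl_cons]
    obtain ⟨ihl, ihr⟩ := pvInner (PySem.Str.lower l) items (acc ++ [l]) R R
      (fun x hx => (PySem.Set.contains_iff R x).mp hx)
      (fun x hx => Or.inl ((PySem.Set.contains_iff R x).mpr hx))
    set st := items.foldl (pvStepItem (PySem.Str.lower l)) (acc ++ [l], R) with hstdef
    have hst : st = (st.1, st.2) := rfl
    rw [hst, ih st.1 st.2]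
    -- rewrite the accumulated prefix
    have hdecide : ∀ y : String, (decide (y ∈ R) : Bool) = PySem.Set.contains R y := by
      intro y
      cases hc : PySem.Set.contains R y with
      | true => simp [(PySem.Set.contains_iff R y).mp hc]
      | false =>
        have hy : y ∉ R := fun hm => by rw [(PySem.Set.contains_iff R y).mpr hm] at hc; cases hc
        simp [hy]
    have hded : pvDedup R items =
        pvDedup [] (items.filter (fun it => !(PySem.Set.contains R (pvKey it)))) := by
      rw [pvDedup_filter_seen items R [] R (fun x => by simp)]
      congr 1
      exact List.filter_congr (fun it _ => by rw [hdecide])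
    have hacc : st.1 = acc ++ [l] ++
        (pvDedup [] (items.filter (fun it => !(PySem.Set.contains R (pvKey it))))).filterMap
          (pvFm (PySem.Str.lower l)) := by rw [ihl, hded]
    -- rewrite the remaining filter
    have hfil : items.filter (fun it => !(PySem.Set.contains st.2 (pvKey it))) =
        (items.filter (fun it => !(PySem.Set.contains R (pvKey it)))).filter
          (fun it => !(PySem.Str.isIn (pvKey it) (PySem.Str.lower l))) := by
      rw [List.filter_filter]
      refine List.filter_congr (fun it hit => ?_)
      cases hS : PySem.Set.contains st.2 (pvKey it) with
      | true =>
        rcases (ihr _).mp hS with h | ⟨it', _, he, hi⟩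
        · rw [h]; simp
        · rw [hi]; rfl
      | false =>
        have hnR : PySem.Set.contains R (pvKey it) = false := by
          cases hc : PySem.Set.contains R (pvKey it) with
          | true => rw [(ihr _).mpr (Or.inl hc)] at hS; cases hS
          | false => rfl
        have hnm : PySem.Str.isIn (pvKey it) (PySem.Str.lower l) = false := by
          cases hm : PySem.Str.isIn (pvKey it) (PySem.Str.lower l) with
          | true => rw [(ihr _).mpr (Or.inr ⟨it, hit, rfl, hm⟩)] at hS; cases hS
          | false => rfl
        rw [hnR, hnm]; rfl
    rw [hacc, hfil]
    simp only [pvG, List.append_assoc, List.cons_append, List.nil_append]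

-- folding A's raw line step = folding the processed lines
theorem pvRawLines (items : List (List (String × String))) (raw : List String)
    (st : List String × PySem.Set String) :
    raw.foldl (pvStepLine items) st =
      (((raw.map PySem.Str.strip).filter (fun s => s != "")).foldl
        (fun st l => items.foldl (pvStepItem (PySem.Str.lower l)) (st.1 ++ [l], st.2)) st) := by
  induction raw generalizing st with
  | nil => rfl
  | cons l rest ih =>
    simp only [List.map_cons, List.filter_cons, List.foldl_cons]
    by_cases hb : PySem.Str.strip l = ""
    · simp only [hb, bne_self_eq_false, Bool.false_eq_true, if_false]
      rw [← ih st]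
      simp only [pvStepLine, hb, if_true]
    · have : (PySem.Str.strip l != "") = true := bne_iff_ne.mpr hb
      simp only [this, if_true, List.foldl_cons]
      rw [← ih]
      simp only [pvStepLine, if_neg hb]

-- B's index fold builds pvDedup
theorem pvIdx (items : List (List (String × String))) (S : PySem.Set String)
    (acc : List (String × List (String × String))) :
    (items.foldl
      (fun (st : PySem.Set String × List (String × List (String × String))) item =>
        let k := PySem.Str.lower (pvLookup item "keyword")
        if PySem.Set.contains st.1 k then st
        else (PySem.Set.add st.1 k, st.2 ++ [(k, item)])) (S, acc)).2 =
      acc ++ pvDedup S items := by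
  induction items generalizing S acc with
  | nil => simp [pvDedup]
  | cons it rest ih =>
    simp only [List.foldl_cons]
    by_cases hc : PySem.Set.contains S (PySem.Str.lower (pvLookup it "keyword")) = true
    · rw [if_pos hc]
      have hm : pvKey it ∈ S := (PySem.Set.contains_iff S _).mp hc
      simp only [pvDedup, if_pos hm]
      exact ih S acc
    · rw [if_neg (by simpa using hc)]
      have hm : ¬ pvKey it ∈ S := fun hmem => hc ((PySem.Set.contains_iff S _).mpr hmem)
      simp only [pvDedup, if_neg hm]
      rw [ih]
      have hcg := pvDedup_congr (PySem.Set.add S (pvKey it)) (pvKey it :: S) rest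
        (fun x _ => by simp only [PySem.Set.mem_add, List.mem_cons]; tauto)
      simp only [pvKey] at hcg
      rw [hcg]
      simp only [pvKey]
      simp [List.append_assoc]

-- B's assign fold is a filterMap
theorem pvAssign (lowers : List String) (entries : List (String × List (String × String)))
    (acc : List (Int × String)) :
    entries.foldl
      (fun (acc : List (Int × String)) p =>
        match pvFirstLine p.1 0 lowers with
        | some i => acc ++ [(i, pvSnippet p.2)]
        | none => acc) acc =
      acc ++ entries.filterMap (fun p => (pvFirstLine p.1 0 lowers).map (fun i => (i, pvSnippet p.2))) := by
  induction entries generalizing acc with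
  | nil => simp
  | cons p rest ih =>
    simp only [List.foldl_cons, List.filterMap_cons]
    cases hf : pvFirstLine p.1 0 lowers with
    | none => simpa using ih acc
    | some i => simpa [List.append_assoc] using ih (acc ++ [(i, pvSnippet p.2)])

-- B's output fold is a flatMap over the enumerated lines
theorem pvOutFold (ls : List String) (n : Int) (asg : List (Int × String)) (acc : List String) :
    (PySem.List.enumerate ls n).foldl
      (fun (acc : List String) p =>
        (acc ++ [p.2]) ++ (asg.filter (fun q => q.1 == p.1)).map (fun q => q.2)) acc =
      acc ++ (PySem.List.enumerate ls n).flatMap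
        (fun p => p.2 :: (asg.filter (fun q => q.1 == p.1)).map (fun q => q.2)) := by
  induction ls generalizing n acc with
  | nil => simp [PySem.List.enumerate_nil]
  | cons l rest ih =>
    rw [PySem.List.enumerate_cons]
    simp only [List.foldl_cons, List.flatMap_cons]
    rw [ih]
    simp [List.append_assoc]

-- B's grouped emission equals pvG
theorem pvMainB (ls : List String) (items : List (List (String × String))) (n : Int) :
    (PySem.List.enumerate ls n).flatMap
      (fun p => p.2 ::
        (((pvDedup [] items).filterMap
            (fun q => (pvFirstLine q.1 n (ls.map PySem.Str.lower)).map (fun i => (i, pvSnippet q.2)))).filter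
          (fun q => q.1 == p.1)).map (fun q => q.2)) =
      pvG items ls := by
  induction ls generalizing items n with
  | nil => simp [PySem.List.enumerate_nil, pvG]
  | cons l rest ih =>
    rw [PySem.List.enumerate_cons, List.flatMap_cons]
    have hfl : ∀ (k : String) (m : Int), pvFirstLine k m (PySem.Str.lower l :: rest.map PySem.Str.lower) =
        if PySem.Str.isIn k (PySem.Str.lower l) = true then some m
        else pvFirstLine k (m + 1) (rest.map PySem.Str.lower) := fun k m => rfl
    -- head block: snippets grouped at index n are exactly the matches of line l
    have hhead : (((pvDedup [] items).filterMap
          (fun q => (pvFirstLine q.1 n ((l :: rest).map PySem.Str.lower)).map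
            (fun i => (i, pvSnippet q.2)))).filter (fun q => q.1 == n)).map (fun q => q.2) =
        (pvDedup [] items).filterMap (pvFm (PySem.Str.lower l)) := by
      rw [List.filter_filterMap, List.map_filterMap]
      refine List.filterMap_congr (fun q _ => ?_)
      simp only [List.map_cons]
      rw [hfl]
      by_cases hm : PySem.Str.isIn q.1 (PySem.Str.lower l) = true
      · rw [if_pos hm]
        have hv : pvFm (PySem.Str.lower l) q = some (pvSnippet q.2) := by
          simp only [pvFm]; rw [if_pos hm]
        rw [hv]
        simp [Option.filter]
      · rw [if_neg hm]
        have hv : pvFm (PySem.Str.lower l) q = none := by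
          simp only [pvFm]; rw [if_neg hm]
        rw [hv]
        cases hj : pvFirstLine q.1 (n + 1) (rest.map PySem.Str.lower) with
        | none => rfl
        | some j =>
          have hge := pvFirstLine_ge _ _ _ _ hj
          have hne : (j == n) = false := by simp; omega
          simp [Option.filter, hne]
    -- tail blocks: the groups at indices ≥ n+1 are those of the matched-filtered items
    have htail : ∀ p ∈ PySem.List.enumerate rest (n + 1),
        (((pvDedup [] items).filterMap
            (fun q => (pvFirstLine q.1 n ((l :: rest).map PySem.Str.lower)).map
              (fun i => (i, pvSnippet q.2)))).filter (fun q => q.1 == p.1)) =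
        (((pvDedup [] (items.filter (fun it => !(PySem.Str.isIn (pvKey it) (PySem.Str.lower l))))).filterMap
            (fun q => (pvFirstLine q.1 (n + 1) (rest.map PySem.Str.lower)).map
              (fun i => (i, pvSnippet q.2)))).filter (fun q => q.1 == p.1)) := by
      intro p hp
      obtain ⟨k, hk, rfl⟩ := (PySem.List.mem_enumerate_iff rest (n + 1) p).mp hp
      rw [pvDedup_filter_key (fun k => !(PySem.Str.isIn k (PySem.Str.lower l))) items []]
      rw [List.filterMap_filter, List.filter_filterMap, List.filter_filterMap]
      refine List.filterMap_congr (fun q _ => ?_)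
      simp only [List.map_cons]
      rw [hfl]
      by_cases hm : PySem.Str.isIn q.1 (PySem.Str.lower l) = true
      · rw [if_pos hm, if_neg (by rw [hm]; simp)]
        have hne : (n == n + 1 + (k : Int)) = false := by simp; omega
        simp [Option.filter, hne]
      · rw [if_neg hm, if_pos (by simp only [Bool.not_eq_true] at hm; rw [hm]; rfl)]
    rw [List.map_cons] at hhead htail ⊢
    calc (l :: (((pvDedup [] items).filterMap
            (fun q => (pvFirstLine q.1 n (PySem.Str.lower l :: rest.map PySem.Str.lower)).map
              (fun i => (i, pvSnippet q.2)))).filter (fun q => q.1 == n)).map (fun q => q.2)) ++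
          (PySem.List.enumerate rest (n + 1)).flatMap
            (fun p => p.2 :: (((pvDedup [] items).filterMap
              (fun q => (pvFirstLine q.1 n (PySem.Str.lower l :: rest.map PySem.Str.lower)).map
                (fun i => (i, pvSnippet q.2)))).filter (fun q => q.1 == p.1)).map (fun q => q.2))
        = (l :: (pvDedup [] items).filterMap (pvFm (PySem.Str.lower l))) ++
          (PySem.List.enumerate rest (n + 1)).flatMap
            (fun p => p.2 :: (((pvDedup [] (items.filter
                (fun it => !(PySem.Str.isIn (pvKey it) (PySem.Str.lower l))))).filterMap
              (fun q => (pvFirstLine q.1 (n + 1) (rest.map PySem.Str.lower)).map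
                (fun i => (i, pvSnippet q.2)))).filter (fun q => q.1 == p.1)).map (fun q => q.2)) := by
          rw [hhead]
          congr 1
          simp only [List.flatMap]
          refine congrArg List.flatten (List.map_congr_left (fun p hp => ?_))
          rw [htail p hp]
      _ = pvG items (l :: rest) := by
          rw [ih]
          simp [pvG]

-- ===== VERDICT (by name: the statement is the Claim_ definition above) =====
theorem dynamic_format_itinerary_spec : Claim_equal_dynamic_format_itinerary := by
  intro plan items _ _
  unfold Spec_dynamic_format_itinerary
  have hemp : (PySem.Set.empty : PySem.Set String) = ([] : List String) := rfl
  set ls := ((PySem.Str.splitlines plan).map PySem.Str.strip).filter (fun s => s != "") with hls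
  have hfilter : items.filter (fun it => !(PySem.Set.contains PySem.Set.empty (pvKey it))) = items := by
    simp [PySem.Set.contains, PySem.Set.empty]
  have hA : dynamic_format_itinerary plan items = PySem.Str.join "\n\n" (pvG items ls) := by
    have h0 : dynamic_format_itinerary plan items =
        PySem.Str.join "\n\n"
          ((PySem.Str.splitlines plan).foldl (pvStepLine items) ([], PySem.Set.empty)).1 := rfl
    rw [h0, pvRawLines items (PySem.Str.splitlines plan) ([], PySem.Set.empty)]
    rw [← hls, pvOuter items ls [] PySem.Set.empty, hfilter, List.nil_append]
  have hB : dynamic_format_itinerary_alt plan items =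
      if ls = [] then "" else PySem.Str.join "\n\n" (pvG items ls) := by
    have h0 : dynamic_format_itinerary_alt plan items =
        (if ls = [] then "" else PySem.Str.join "\n\n" ((PySem.List.enumerate ls 0).foldl (fun (acc : List String) p => (acc ++ [p.2]) ++ ((((items.foldl (fun (st : PySem.Set String × List (String × List (String × String))) item => let k := PySem.Str.lower (pvLookup item "keyword"); if PySem.Set.contains st.1 k then st else (PySem.Set.add st.1 k, st.2 ++ [(k, item)])) (PySem.Set.empty, [])).2.foldl (fun (acc : List (Int × String)) p => match pvFirstLine p.1 0 (ls.map PySem.Str.lower) with | some i => acc ++ [(i, pvSnippet p.2)] | none => acc) []).filter (fun q => q.1 == p.1)).map (fun q => q.2))) [])) := rfl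
    rw [h0]
    by_cases hnil : ls = []
    · rw [if_pos hnil, if_pos hnil]
    · rw [if_neg hnil, if_neg hnil]
      rw [pvIdx items PySem.Set.empty [], List.nil_append, hemp]
      rw [pvAssign, List.nil_append]
      rw [pvOutFold, List.nil_append]
      rw [pvMainB ls items 0]
  rw [hA, hB]
  by_cases h0 : ls = []
  · rw [if_pos h0, h0]
    rfl
  · rw [if_neg h0]
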